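-- pv_equiv track=rewrite | github.com/AltruXeno/PencilDurabilityKata | PencilDurabilityTester.py | determine_expected_score
-- ===== SOURCE A (Python) =====
-- def determine_expected_score(string_to_write):
--     score = 0
--
--     # Remove the specified whitespaces from the string and see how many characters remain
--     string_without_whitespaces = string_to_write.replace(' ', '').replace('\n', '')
--
--     # Determine the score -- capital letters are worth 2 while lowercase letters are worth 1.
--     # Non-alphanumeric characters were not specified and will be worth one point as well.
--     for character in string_without_whitespaces:
--         if character.isupper():
--             score += 2
--         else:
--             score += 1
--
--     return score
-- ===== SOURCE B (Python) =====
-- def determine_expected_score(string_to_write):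
--     # Frequency-table approach: tally each distinct remaining character once,
--     # then sum weight(char) * multiplicity over the table.
--     stripped = string_to_write.replace(' ', '').replace('\n', '')
--     counts = {}
--     for ch in stripped:
--         counts[ch] = counts.get(ch, 0) + 1
--     total = 0
--     for ch, n in counts.items():
--         total += (2 if ch.isupper() else 1) * n
--     return total
-- ===== Notes on version B (the rewrite author's own statement) =====
-- stated objective: alternative
-- what changed: Replaces A's single per-character branch-accumulator pass with a frequency table: build a dict of character multiplicities once, then compute the score as the sum of weight(char)*count over the distinct characters.
import Mathlib
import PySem

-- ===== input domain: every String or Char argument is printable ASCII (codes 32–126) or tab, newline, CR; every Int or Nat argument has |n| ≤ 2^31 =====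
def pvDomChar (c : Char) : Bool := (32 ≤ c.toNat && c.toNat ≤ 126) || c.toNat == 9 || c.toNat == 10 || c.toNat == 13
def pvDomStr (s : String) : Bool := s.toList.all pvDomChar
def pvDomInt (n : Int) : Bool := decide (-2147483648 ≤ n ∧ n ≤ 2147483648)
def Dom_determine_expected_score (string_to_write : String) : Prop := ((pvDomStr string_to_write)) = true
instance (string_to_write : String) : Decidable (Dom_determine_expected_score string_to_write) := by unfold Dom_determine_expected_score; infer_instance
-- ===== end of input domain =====

-- ===== PORT A =====
-- A: strip ' ' and '\n', then one pass adding 2 per uppercase char and 1 per other char.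
def determine_expected_score (string_to_write : String) : Int :=
  let string_without_whitespaces :=
    PySem.Str.replace (PySem.Str.replace string_to_write " " "") "\n" ""
  string_without_whitespaces.toList.foldl
    (fun score character => if PySem.Chars.isupper character then score + 2 else score + 1) 0

-- ===== PORT B =====
-- B (alternative): strip the same whitespace, build a character-frequency dict,
-- then sum weight(char) * multiplicity over its items.
def determine_expected_score_alt (string_to_write : String) : Int :=
  let stripped := PySem.Str.replace (PySem.Str.replace string_to_write " " "") "\n" ""
  let counts : PySem.Dict Char Int :=
    stripped.toList.foldl (fun d ch => d.insert ch (d.getD ch 0 + 1)) PySem.Dict.empty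
  counts.items.foldl
    (fun total p => total + (if PySem.Chars.isupper p.1 then (2 : Int) else 1) * p.2) 0

-- ===== PRECONDITION & SPEC =====
def Spec_determine_expected_score (string_to_write : String) (out : Int) : Prop := out = determine_expected_score_alt string_to_write
instance (string_to_write : String) (out : Int) : Decidable (Spec_determine_expected_score string_to_write out) := by unfold Spec_determine_expected_score; infer_instance

-- ===== CLAIM (what is proved, stated in full; the proofs are below) =====
def Claim_equal_determine_expected_score : Prop := ∀ (string_to_write : String), Dom_determine_expected_score string_to_write → Spec_determine_expected_score string_to_write (determine_expected_score string_to_write)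

-- ===== LEMMAS AND PROOFS =====

-- the per-character weight both programs are about
def pvWeight (c : Char) : Int := if PySem.Chars.isupper c then 2 else 1

lemma foldA_eq_sum (l : List Char) (a : Int) :
    l.foldl (fun score c => if PySem.Chars.isupper c then score + 2 else score + 1) a
      = a + (l.map pvWeight).sum := by
  induction l generalizing a with
  | nil => simp
  | cons c l ih =>
    simp only [List.foldl_cons, List.map_cons, List.sum_cons, ih, pvWeight]
    by_cases h : PySem.Chars.isupper c <;> simp [h] <;> ring

lemma foldB_eq_sum (ps : List (Char × Int)) (a : Int) :
    ps.foldl (fun total p => total + (if PySem.Chars.isupper p.1 then (2 : Int) else 1) * p.2) a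
      = a + (ps.map (fun p => pvWeight p.1 * p.2)).sum := by
  induction ps generalizing a with
  | nil => simp
  | cons p ps ih =>
    simp only [List.foldl_cons, List.map_cons, List.sum_cons, ih, pvWeight]
    ring

-- summing weight*multiplicity over the distinct characters equals summing the weight per occurrence
lemma sum_over_dedup (l : List Char) :
    ((PySem.Set.ofList l).map (fun k => pvWeight k * (l.count k : Int))).sum
      = (l.map pvWeight).sum := by
  have hfin : (PySem.Set.ofList l).toFinset = l.toFinset := by
    ext x; simp [PySem.Set.mem_ofList]
  have h1 : ((PySem.Set.ofList l).map (fun k => pvWeight k * (l.count k : Int))).sum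
      = ∑ x ∈ l.toFinset, pvWeight x * (l.count x : Int) := by
    rw [← hfin, ← List.sum_toFinset _ (PySem.Set.nodup_ofList l)]
  rw [h1, Finset.sum_list_map_count]
  refine Finset.sum_congr rfl fun x _ => ?_
  simp; ring

theorem determine_expected_score_spec : Claim_equal_determine_expected_score := by
  intro s _
  unfold Spec_determine_expected_score determine_expected_score determine_expected_score_alt
  simp only [PySem.Dict.foldl_insert_getD_add_one_eq_counter]
  rw [foldA_eq_sum, foldB_eq_sum, PySem.Dict.items_counter]
  simp only [List.map_map, Function.comp_def]
  rw [sum_over_dedup]
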